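-- pv_equiv track=rewrite | github.com/monxpronx/Coding-Test | 프로그래머스/0/181874. A 강조하기/A 강조하기.py | solution
-- ===== SOURCE A (Python) =====
-- def solution(myString):
--     answer = ''
--
--     for i in range(len(myString)):
--         if myString[i] == 'a':
--             answer += 'A'
--         elif ord('B') <= ord(myString[i]) <= ord('Z'):
--             answer += myString[i].lower()
--         else:
--             answer += myString[i]
--
--     return answer
-- ===== SOURCE B (Python) =====
-- def solution(myString):
--     table = str.maketrans({'a': 'A', **{chr(k): chr(k + 32) for k in range(ord('B'), ord('Z') + 1)}})
--     return myString.translate(table)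
-- ===== Notes on version B (the rewrite author's own statement) =====
-- stated objective: faster
-- what changed: Replaces the per-character if/elif classification loop with repeated string concatenation by a translation table built once (str.maketrans mapping 'a'->'A' and 'B'..'Z' to lowercase) applied in a single str.translate pass.
import Mathlib
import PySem

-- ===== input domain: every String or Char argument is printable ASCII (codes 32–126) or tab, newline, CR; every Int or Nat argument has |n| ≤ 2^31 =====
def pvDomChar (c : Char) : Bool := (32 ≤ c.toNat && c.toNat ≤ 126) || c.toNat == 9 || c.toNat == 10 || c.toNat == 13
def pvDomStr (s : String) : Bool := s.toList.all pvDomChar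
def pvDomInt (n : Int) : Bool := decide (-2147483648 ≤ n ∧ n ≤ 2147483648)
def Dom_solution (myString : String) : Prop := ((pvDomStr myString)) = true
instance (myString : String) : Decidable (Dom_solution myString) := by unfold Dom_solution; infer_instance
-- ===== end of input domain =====

-- B builds the 'a'->'A', 'B'..'Z'->lowercase translation table once and maps it over the
-- string in a single pass, instead of A's per-character if/elif loop with string concatenation.

-- ===== PORT A =====
-- per-character loop: 'a' -> "A"; 'B'..'Z' -> .lower(); else unchanged; appended to answer
def solution (myString : String) : String :=
  myString.toList.foldl
    (fun answer c =>
      if c = 'a' then answer ++ "A"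
      else if 'B' ≤ c ∧ c ≤ 'Z' then answer.push (PySem.Chars.lowerChar c)
      else answer.push c)
    ""

-- ===== PORT B =====
-- str.maketrans({'a': 'A', **{chr(k): chr(k+32) for k in range(ord('B'), ord('Z')+1)}})
def solutionTable : PySem.Dict Char Char :=
  (PySem.List.pyRange 66 91 1).foldl
    (fun d k => d.insert (Char.ofNat k.toNat) (Char.ofNat (k.toNat + 32)))
    ((PySem.Dict.empty : PySem.Dict Char Char).insert 'a' 'A')

-- myString.translate(table): each char replaced by its table entry, untouched if absent
def solution_alt (myString : String) : String :=
  String.ofList (myString.toList.map (fun c => solutionTable.getD c c))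

-- ===== PRECONDITION & SPEC =====
def Spec_solution (myString : String) (out : String) : Prop := out = solution_alt myString
instance (myString : String) (out : String) : Decidable (Spec_solution myString out) := by unfold Spec_solution; infer_instance

-- ===== CLAIM (what is proved, stated in full; the proofs are below) =====
def Claim_equal_solution : Prop := ∀ (myString : String), Dom_solution myString → Spec_solution myString (solution myString)

-- ===== LEMMAS AND PROOFS =====

-- the per-character value of A's branch chain
def pvStepA (c : Char) : Char :=
  if c = 'a' then 'A'
  else if 'B' ≤ c ∧ c ≤ 'Z' then PySem.Chars.lowerChar c
  else c

-- A's fold appends exactly one character per step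
lemma solution_foldl_toList (l : List Char) (acc : String) :
    (l.foldl
      (fun answer c =>
        if c = 'a' then answer ++ "A"
        else if 'B' ≤ c ∧ c ≤ 'Z' then answer.push (PySem.Chars.lowerChar c)
        else answer.push c)
      acc).toList = acc.toList ++ l.map pvStepA := by
  induction l generalizing acc with
  | nil => simp
  | cons c t ih =>
    simp only [List.foldl_cons, List.map_cons, ih, pvStepA]
    split_ifs <;> simp

-- table lookup agrees with A's branch chain on every domain character
set_option maxRecDepth 4000 in
lemma table_getD_eq (c : Char) (h : pvDomChar c = true) :
    solutionTable.getD c c = pvStepA c := by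
  have hlt : c.toNat < 128 := by
    simp only [pvDomChar, Bool.or_eq_true, Bool.and_eq_true, decide_eq_true_eq, beq_iff_eq]
      at h
    omega
  have hc : Char.ofNat c.toNat = c := Char.ofNat_toNat c
  have key : ∀ n ∈ List.range 128,
      solutionTable.getD (Char.ofNat n) (Char.ofNat n) = pvStepA (Char.ofNat n) := by decide
  have := key c.toNat (List.mem_range.mpr hlt)
  rwa [hc] at this

-- ===== VERDICT (by name: the statement is the Claim_ definition above) =====
theorem solution_spec : Claim_equal_solution := by
  intro s hdom
  unfold Spec_solution solution solution_alt
  apply String.ext  -- equality of Strings from equality of their char lists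
  rw [solution_foldl_toList]
  simp only [String.toList_ofList, List.nil_append, String.toList_empty]
  apply List.map_congr_left
  intro c hc
  have hcdom : pvDomChar c = true := by
    have := (List.all_eq_true.mp (by simpa [pvDomStr, Dom_solution] using hdom)) c hc
    simpa using this
  exact (table_getD_eq c hcdom).symm
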